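-- pv_equiv track=rewrite | github.com/casePloeg/kattis | honey.py | get_concat_length
-- ===== SOURCE A (Python) =====
-- def has_repeating(string):
--     chars = set()
--     for c in string:
--         if c not in chars:
--             chars.add(c)
--         else:
--             return True
--     return False
--
-- def get_concat_length(strings):
--     total_length = 0
--     string = ''
--     for i in strings:
--         string += i
--
--     if has_repeating(string):
--         return -1
--     return len(string)
-- ===== SOURCE B (Python) =====
-- def get_concat_length(strings):
--     chars = sorted(c for s in strings for c in s)
--     for i in range(1, len(chars)):
--         if chars[i - 1] == chars[i]:
--             return -1
--     return len(chars)
-- ===== Notes on version B (the rewrite author's own statement) =====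
-- stated objective: alternative
-- what changed: B sorts all characters and detects a duplicate by comparing adjacent elements of the sorted list, instead of A's concatenate-then-scan-with-a-set early-exit search; no set and no concatenated string are built.
import Mathlib
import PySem

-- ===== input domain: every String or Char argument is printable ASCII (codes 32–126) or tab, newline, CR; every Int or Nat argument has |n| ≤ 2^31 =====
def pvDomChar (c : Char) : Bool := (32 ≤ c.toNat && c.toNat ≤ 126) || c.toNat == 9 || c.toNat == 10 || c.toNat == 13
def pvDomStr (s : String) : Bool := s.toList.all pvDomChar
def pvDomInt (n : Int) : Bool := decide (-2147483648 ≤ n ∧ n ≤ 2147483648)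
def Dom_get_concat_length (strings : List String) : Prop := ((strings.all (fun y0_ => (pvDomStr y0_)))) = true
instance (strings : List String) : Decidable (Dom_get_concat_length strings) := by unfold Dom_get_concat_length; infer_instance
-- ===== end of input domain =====

-- B sorts all the characters and spots a duplicate as two equal adjacent elements of the sorted list — no set, no concatenated string; objective: alternative.
-- ===== PORT A =====
-- has_repeating: scan the string, early-return True on first repeated character
def hasRepeatingAux : List Char → PySem.Set Char → Bool
  | [], _ => false
  | c :: rest, chars =>
      if PySem.Set.contains chars c then true
      else hasRepeatingAux rest (PySem.Set.add chars c)

def has_repeating (string : List Char) : Bool :=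
  hasRepeatingAux string PySem.Set.empty

def get_concat_length (strings : List String) : Int :=
  let string : List Char := strings.foldl (fun acc i => acc ++ i.toList) []
  if has_repeating string then -1 else (string.length : Int)

-- ===== PORT B =====
-- the `for i in range(1, len(chars)): if chars[i-1] == chars[i]: return -1` loop:
-- walk the adjacent pairs, early true on an equal pair
def adjDup : List Char → Bool
  | a :: b :: rest => if a == b then true else adjDup (b :: rest)
  | _ => false

def get_concat_length_alt (strings : List String) : Int :=
  let chars : List Char := PySem.List.sorted (strings.flatMap String.toList) (fun c => c) false
  if adjDup chars then -1 else (chars.length : Int)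

-- ===== PRECONDITION & SPEC =====
def Spec_get_concat_length (strings : List String) (out : Int) : Prop := out = get_concat_length_alt strings
instance (strings : List String) (out : Int) : Decidable (Spec_get_concat_length strings out) := by unfold Spec_get_concat_length; infer_instance

-- ===== CLAIM =====
def Claim_equal_get_concat_length : Prop := ∀ (strings : List String), Dom_get_concat_length strings → Spec_get_concat_length strings (get_concat_length strings)

-- ===== LEMMAS AND PROOFS =====

-- A's concatenation loop is the flatten of the character lists
theorem concat_foldl (strings : List String) (acc : List Char) :
    strings.foldl (fun acc i => acc ++ i.toList) acc
      = acc ++ strings.flatMap String.toList := by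
  induction strings generalizing acc with
  | nil => simp
  | cons s rest ih => simp [List.foldl, ih, List.append_assoc]

-- A's early-exit set scan finds a repeat iff the list has a duplicate or meets the seeded set
theorem hasRepeatingAux_eq (l : List Char) (s : PySem.Set Char) :
    hasRepeatingAux l s = !decide (l.Nodup ∧ ∀ c ∈ l, c ∉ s) := by
  induction l generalizing s with
  | nil => simp [hasRepeatingAux]
  | cons c rest ih =>
      rw [hasRepeatingAux]
      by_cases hc : c ∈ s
      · have hcont : PySem.Set.contains s c = true := (PySem.Set.contains_iff s c).mpr hc
        rw [if_pos hcont]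
        simp [hc]
      · have hcont : ¬ PySem.Set.contains s c = true :=
          fun h => hc ((PySem.Set.contains_iff s c).mp h)
        rw [if_neg hcont, ih]
        congr 1
        rw [decide_eq_decide]
        constructor
        · rintro ⟨hnd, hall⟩
          have hmem : ∀ x ∈ rest, x ≠ c ∧ x ∉ s := by
            intro x hx
            have := hall x hx
            rw [PySem.Set.mem_add] at this
            push Not at this
            exact ⟨this.2, this.1⟩
          refine ⟨List.nodup_cons.mpr ⟨fun hcr => (hmem c hcr).1 rfl, hnd⟩, ?_⟩
          intro x hx
          rcases List.mem_cons.mp hx with rfl | hx'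
          · exact hc
          · exact (hmem x hx').2
        · rintro ⟨hnd, hall⟩
          rcases List.nodup_cons.mp hnd with ⟨hcr, hnd'⟩
          refine ⟨hnd', fun x hx => ?_⟩
          rw [PySem.Set.mem_add]
          push Not
          exact ⟨hall x (List.mem_cons_of_mem _ hx), fun hxc => hcr (hxc ▸ hx)⟩

theorem has_repeating_eq (l : List Char) :
    has_repeating l = !decide l.Nodup := by
  rw [has_repeating, hasRepeatingAux_eq]
  simp [PySem.Set.empty]

-- adjacent-pair scan on a ≤-sorted list detects exactly non-Nodup
theorem adjDup_of_pairwise (xs : List Char) (h : xs.Pairwise (· ≤ ·)) :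
    adjDup xs = !decide xs.Nodup := by
  induction xs with
  | nil => simp [adjDup]
  | cons a t ih =>
      cases t with
      | nil => simp [adjDup]
      | cons b u =>
          rcases List.pairwise_cons.mp h with ⟨hab, ht⟩
          rw [adjDup]
          by_cases he : a = b
          · subst he
            simp
          · rw [if_neg (by simpa using he), ih ht]
            congr 1
            rw [decide_eq_decide]
            constructor
            · intro hnd
              refine List.nodup_cons.mpr ⟨?_, hnd⟩
              intro hmem
              rcases List.mem_cons.mp hmem with rfl | hmem'
              · exact he rfl
              · have h1 : a ≤ b := hab b (List.mem_cons_self ..)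
                have h2 : b ≤ a := (List.pairwise_cons.mp ht).1 a hmem'
                exact he (le_antisymm h1 h2)
            · intro hnd
              exact (List.nodup_cons.mp hnd).2

-- ===== VERDICT =====
theorem get_concat_length_spec : Claim_equal_get_concat_length := by
  intro strings _
  unfold Spec_get_concat_length
  have hperm : (PySem.List.sorted (strings.flatMap String.toList) (fun c => c) false).Perm
      (strings.flatMap String.toList) := PySem.List.sorted_perm ..
  have hpw : (PySem.List.sorted (strings.flatMap String.toList) (fun c => c) false).Pairwise
      (· ≤ ·) := by
    simpa using PySem.List.sorted_pairwise (strings.flatMap String.toList) (fun c => c)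
  have hnd : decide (PySem.List.sorted (strings.flatMap String.toList) (fun c => c) false).Nodup
      = decide (strings.flatMap String.toList).Nodup := decide_eq_decide.mpr hperm.nodup_iff
  simp only [get_concat_length, get_concat_length_alt, concat_foldl, List.nil_append,
    has_repeating_eq, adjDup_of_pairwise _ hpw, hnd, hperm.length_eq]
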